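-- pv_equiv track=rewrite | github.com/bhushanasati25/TUF-DSA-Course | .vscode/ Smallest Missing Non-negative Integer After Operations.py | findSmallestInteger
-- ===== SOURCE A (Python) =====
-- from collections import Counter
--
-- def findSmallestInteger(nums, value):
--     """
--     :type nums: List[int]
--     :type value: int
--     :rtype: int
--     """
--     cnt = Counter(n % value for n in nums)  # remainders multiset
--
--     x = 0
--     while True:
--         r = x % value
--         if cnt[r] > 0:
--             cnt[r] -= 1
--             x += 1
--         else:
--             return x
-- ===== SOURCE B (Python) =====
-- from collections import Counter
--
-- def findSmallestInteger(nums, value):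
--     v = abs(value)
--     cnt = Counter(n % v for n in nums)
--     return min(r + cnt[r] * v for r in range(min(v, len(nums) + 1)))
-- ===== Notes on version B (the rewrite author's own statement) =====
-- stated objective: simpler
-- what changed: B replaces A's step-by-step simulation of x = 0,1,2,... consuming one remainder per step with a direct closed-form minimum over residue classes: the first uncovered integer in class r is r + cnt[r]*v, so the answer is the minimum of that over r in range(min(v, len(nums)+1)) (the cap keeps it O(n) when value is huge; some class below len(nums)+1 is empty, so the cap never changes the minimum).
import Mathlib
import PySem

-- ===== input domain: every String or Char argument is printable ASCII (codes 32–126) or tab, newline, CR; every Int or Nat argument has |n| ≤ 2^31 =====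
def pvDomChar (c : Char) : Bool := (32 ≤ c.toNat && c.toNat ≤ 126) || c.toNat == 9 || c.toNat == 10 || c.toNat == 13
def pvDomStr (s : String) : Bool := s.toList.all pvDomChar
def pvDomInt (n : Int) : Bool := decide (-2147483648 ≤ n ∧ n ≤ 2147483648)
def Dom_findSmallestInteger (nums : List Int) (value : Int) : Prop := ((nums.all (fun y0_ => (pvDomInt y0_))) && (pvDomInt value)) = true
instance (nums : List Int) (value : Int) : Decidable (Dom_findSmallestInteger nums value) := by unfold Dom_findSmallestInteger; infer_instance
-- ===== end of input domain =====

-- B computes the answer as a closed-form minimum over residue classes instead of A's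
-- one-integer-at-a-time simulation loop (objective: simpler).

-- ===== PORT A =====
-- A's 'while True' loop, ported with explicit fuel; pv_loop_eq below shows the loop
-- returns before this fuel runs out on every input with value ≠ 0.
def findSmallestIntegerLoop (value : Int) : PySem.Dict Int Int → Int → Nat → Int
  | _, x, 0 => x
  | cnt, x, fuel + 1 =>
    let r := PySem.Int.mod x value
    if cnt.getD r 0 > 0 then
      findSmallestIntegerLoop value (cnt.insert r (cnt.getD r 0 - 1)) (x + 1) fuel
    else
      x

def findSmallestInteger (nums : List Int) (value : Int) : Int :=
  let cnt := PySem.Dict.counter (nums.map (fun n => PySem.Int.mod n value))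
  findSmallestIntegerLoop value cnt 0 (nums.length * value.natAbs + 1)

-- ===== PORT B =====
-- min() of an empty iterable raises ValueError; under Pre_ (value ≠ 0) the range is
-- nonempty, so the .getD 0 default is never used.
def findSmallestInteger_alt (nums : List Int) (value : Int) : Int :=
  let v : Int := |value|
  let cnt := PySem.Dict.counter (nums.map (fun n => PySem.Int.mod n v))
  (PySem.List.min?
      ((PySem.List.pyRange 0 (min v (PySem.List.len nums + 1)) 1).map
        (fun r => r + cnt.getD r 0 * v))
      (fun t => t)).getD 0

-- ===== PRECONDITION & SPEC =====
-- A raises ZeroDivisionError (n % 0, or 0 % 0 in the loop) exactly when value = 0;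
-- those inputs are excluded. Pre_ excludes no input on which A returns.
def Pre_findSmallestInteger (nums : List Int) (value : Int) : Prop := value ≠ 0
instance (nums : List Int) (value : Int) : Decidable (Pre_findSmallestInteger nums value) := by
  unfold Pre_findSmallestInteger; infer_instance

def pvWitness_findSmallestInteger : List Int × Int := ([1, 0, 3], 2)

def Spec_findSmallestInteger (nums : List Int) (value : Int) (out : Int) : Prop := out = findSmallestInteger_alt nums value
instance (nums : List Int) (value : Int) (out : Int) : Decidable (Spec_findSmallestInteger nums value out) := by unfold Spec_findSmallestInteger; infer_instance

-- ===== CLAIM (what is proved, stated in full; the proofs are below) =====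
def Claim_equal_findSmallestInteger : Prop := ∀ (nums : List Int) (value : Int), Dom_findSmallestInteger nums value → Pre_findSmallestInteger nums value → Spec_findSmallestInteger nums value (findSmallestInteger nums value)

-- ===== LEMMAS AND PROOFS =====

-- `PySem.Int.mod · value` (Python's %) identifies the same residue classes as `· % |value|` (Lean emod)
theorem pv_key_eq_iff (value a b : Int) (hv : value ≠ 0) :
    PySem.Int.mod a value = PySem.Int.mod b value ↔ a % |value| = b % |value| := by
  have hfa := PySem.Int.floordiv_mul_add_mod a value
  have hfb := PySem.Int.floordiv_mul_add_mod b value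
  constructor
  · intro h
    rw [Int.emod_eq_emod_iff_emod_sub_eq_zero]
    apply Int.emod_eq_zero_of_dvd
    apply (abs_dvd value (a - b)).mpr
    exact ⟨PySem.Int.floordiv a value - PySem.Int.floordiv b value, by linarith⟩
  · intro h
    have hdvd : |value| ∣ a - b := by
      rw [Int.emod_eq_emod_iff_emod_sub_eq_zero] at h
      exact Int.dvd_of_emod_eq_zero h
    have hdvd' : value ∣ a - b := (abs_dvd value (a - b)).mp hdvd
    obtain ⟨k, hk⟩ := hdvd'
    have hdvd2 : |value| ∣ PySem.Int.mod a value - PySem.Int.mod b value := by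
      apply (abs_dvd value _).mpr
      exact ⟨k - (PySem.Int.floordiv a value - PySem.Int.floordiv b value), by linarith⟩
    have hb1 : |PySem.Int.mod a value - PySem.Int.mod b value| < |value| := by
      rcases lt_or_gt_of_ne hv with hneg | hpos
      · have h1 := PySem.Int.mod_neg_bounds a hneg
        have h2 := PySem.Int.mod_neg_bounds b hneg
        rw [abs_of_neg hneg]
        rw [abs_lt]; omega
      · have h1 := PySem.Int.mod_nonneg a hpos
        have h2 := PySem.Int.mod_lt a hpos
        have h3 := PySem.Int.mod_nonneg b hpos
        have h4 := PySem.Int.mod_lt b hpos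
        rw [abs_of_pos hpos]
        rw [abs_lt]; omega
    have := Int.eq_zero_of_abs_lt_dvd hdvd2 hb1
    omega

-- `pvTerm value g x s`: the first multiple-offset integer ≥ x in residue class s, plus the
-- g-count of that class times |value| — i.e. the first uncovered integer of class s from x on
def pvTerm (value : Int) (g : Int → Int) (x s : Int) : Int :=
  (x + (s - x) % |value|) + g (PySem.Int.mod s value) * |value|
def pvTerms (value : Int) (g : Int → Int) (x : Int) : List Int :=
  (PySem.List.pyRange 0 |value| 1).map (pvTerm value g x)
def pvU (value : Int) (g : Int → Int) (x : Int) : Int :=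
  (PySem.List.min? (pvTerms value g x) (fun t => t)).getD 0
theorem pv_min?_eq (l : List Int) (m : Int) (hm : m ∈ l) (hmin : ∀ y ∈ l, m ≤ y) :
    PySem.List.min? l (fun t => t) = some m := by
  cases h : PySem.List.min? l (fun t => t) with
  | none =>
    rw [PySem.List.min?_eq_none_iff] at h
    subst h; cases hm
  | some m' =>
    have h1 := PySem.List.min?_mem h
    have h2 := PySem.List.min?_isMin h
    exact congrArg some (le_antisymm (h2 m hm) (hmin m' h1))


-- every term is ≥ x when the counts are nonnegative
theorem pv_term_ge (value : Int) (g : Int → Int) (x s : Int) (hv : value ≠ 0)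
    (hg : 0 ≤ g (PySem.Int.mod s value)) : x ≤ pvTerm value g x s := by
  have hv' : (0:Int) < |value| := abs_pos.mpr hv
  have h1 : 0 ≤ (s - x) % |value| := Int.emod_nonneg _ (by omega)
  have h2 : 0 ≤ g (PySem.Int.mod s value) * |value| := mul_nonneg hg (le_of_lt hv')
  unfold pvTerm; omega

-- x's own class 0 ≤ x % |value| < |value| has key `PySem.Int.mod x value` and its term from x is x + count*|value|
theorem pv_emod_self_lt (value x : Int) (hv : value ≠ 0) :
    0 ≤ x % |value| ∧ x % |value| < |value| := by
  have hv' : (0:Int) < |value| := abs_pos.mpr hv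
  exact ⟨Int.emod_nonneg x (by omega), Int.emod_lt_of_pos x hv'⟩

theorem pv_key_class (value x : Int) (hv : value ≠ 0) :
    PySem.Int.mod (x % |value|) value = PySem.Int.mod x value := by
  rw [pv_key_eq_iff _ _ _ hv, Int.emod_emod_of_dvd x dvd_rfl]

theorem pv_term_self (value : Int) (g : Int → Int) (x : Int) (hv : value ≠ 0) :
    pvTerm value g x (x % |value|) = x + g (PySem.Int.mod x value) * |value| := by
  unfold pvTerm
  rw [pv_key_class value x hv]
  have : (x % |value| - x) % |value| = 0 := by
    rw [Int.sub_emod, Int.emod_emod_of_dvd x dvd_rfl, sub_self, Int.zero_emod]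
  omega

-- classes other than x's: the term is unchanged when x advances to x+1 and the count of x's class drops
theorem pv_term_step_other (value : Int) (g g' : Int → Int) (x s : Int) (hv : value ≠ 0)
    (hs0 : 0 ≤ s) (hs1 : s < |value|) (hne : s ≠ x % |value|)
    (hg : g' (PySem.Int.mod s value) = g (PySem.Int.mod s value)) :
    pvTerm value g' (x + 1) s = pvTerm value g x s := by
  have hv' : (0:Int) < |value| := abs_pos.mpr hv
  set e := (s - x) % |value| with he
  have he0 : 0 ≤ e := Int.emod_nonneg _ (by omega)
  have he1 : e < |value| := Int.emod_lt_of_pos _ hv'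
  have hee : e ≠ 0 := by
    intro h0
    apply hne
    have : (s - x) % |value| = 0 := by rw [← he, h0]
    have hd := Int.dvd_of_emod_eq_zero this
    have : s % |value| = x % |value| := by
      rw [Int.emod_eq_emod_iff_emod_sub_eq_zero]
      exact Int.emod_eq_zero_of_dvd hd
    rw [← this, Int.emod_eq_of_lt hs0 hs1]
  have hstep : (s - (x + 1)) % |value| = e - 1 := by
    have h1 : (s - (x + 1)) % |value| = (e - 1) % |value| := by
      rw [Int.emod_eq_emod_iff_emod_sub_eq_zero]
      have : s - (x + 1) - (e - 1) = (s - x) - e := by ring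
      rw [this, Int.sub_emod, ← he, Int.emod_eq_of_lt he0 he1, sub_self, Int.zero_emod]
    rw [h1, Int.emod_eq_of_lt (by omega) (by omega)]
  unfold pvTerm
  rw [hstep, hg, ← he]
  ring

-- x's class: advancing x by one and dropping its count by one leaves the term unchanged
theorem pv_term_step_self (value : Int) (g g' : Int → Int) (x : Int) (hv : value ≠ 0)
    (hg : g' (PySem.Int.mod x value) = g (PySem.Int.mod x value) - 1) :
    pvTerm value g' (x + 1) (x % |value|) = pvTerm value g x (x % |value|) := by
  have hv' : (0:Int) < |value| := abs_pos.mpr hv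
  have hstep : (x % |value| - (x + 1)) % |value| = |value| - 1 := by
    have h1 : (x % |value| - (x + 1)) % |value| = (-1) % |value| := by
      rw [Int.emod_eq_emod_iff_emod_sub_eq_zero]
      have : x % |value| - (x + 1) - (-1) = x % |value| - x := by ring
      rw [this, Int.sub_emod, Int.emod_emod_of_dvd x dvd_rfl, sub_self, Int.zero_emod]
    have h2 : (-1 : Int) % |value| = |value| - 1 := by
      have : (-1 : Int) % |value| = (-1 + |value| * 1) % |value| := (Int.add_mul_emod_self_left (-1) |value| 1).symm
      rw [this]
      have : (-1 + |value| * 1 : Int) = |value| - 1 := by ring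
      rw [this, Int.emod_eq_of_lt (by omega) (by omega)]
    rw [h1, h2]
  unfold pvTerm
  rw [hstep, pv_key_class value x hv, hg]
  have hz : (x % |value| - x) % |value| = 0 := by
    rw [Int.sub_emod, Int.emod_emod_of_dvd x dvd_rfl, sub_self, Int.zero_emod]
  rw [hz]
  have h3 : (g (PySem.Int.mod x value) - 1) * |value| = g (PySem.Int.mod x value) * |value| - |value| := by ring
  omega

theorem pv_U_ge (value : Int) (g : Int → Int) (x : Int) (hv : value ≠ 0)
    (hg : ∀ t, 0 ≤ g t) : x ≤ pvU value g x ∧ ∃ m, PySem.List.min? (pvTerms value g x) (fun t => t) = some m := by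
  have hv' : (0:Int) < |value| := abs_pos.mpr hv
  have hmem : pvTerm value g x 0 ∈ pvTerms value g x := by
    exact List.mem_map_of_mem (PySem.List.mem_pyRange_one.mpr ⟨le_refl 0, hv'⟩)
  cases h : PySem.List.min? (pvTerms value g x) (fun t => t) with
  | none =>
    rw [PySem.List.min?_eq_none_iff] at h
    rw [h] at hmem; cases hmem
  | some m =>
    refine ⟨?_, m, rfl⟩
    have hm := PySem.List.min?_mem h
    obtain ⟨s, hs, rfl⟩ := List.mem_map.mp hm
    have := pv_term_ge value g x s hv (hg _)
    unfold pvU; rw [h]; simpa using this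
theorem pv_loop_eq (value : Int) (hv : value ≠ 0) :
    ∀ (fuel : Nat) (cnt : PySem.Dict Int Int) (x : Int), 0 ≤ x →
      (∀ t, 0 ≤ cnt.getD t 0) →
      pvU value (fun t => cnt.getD t 0) x < x + fuel →
      findSmallestIntegerLoop value cnt x fuel = pvU value (fun t => cnt.getD t 0) x := by
  intro fuel
  induction fuel with
  | zero =>
    intro cnt x hx hg hfuel
    have := (pv_U_ge value (fun t => cnt.getD t 0) x hv hg).1
    simp at hfuel; omega
  | succ fuel ih =>
    intro cnt x hx hg hfuel
    have hv' : (0:Int) < |value| := abs_pos.mpr hv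
    simp only [findSmallestIntegerLoop]
    by_cases hc : cnt.getD (PySem.Int.mod x value) 0 > 0
    · rw [if_pos hc]
      have hglue : pvTerms value (fun t => (cnt.insert (PySem.Int.mod x value) (cnt.getD (PySem.Int.mod x value) 0 - 1)).getD t 0) (x + 1)
          = pvTerms value (fun t => cnt.getD t 0) x := by
        unfold pvTerms
        apply List.map_congr_left
        intro s hs
        obtain ⟨hs0, hs1⟩ := PySem.List.mem_pyRange_one.mp hs
        by_cases hss : s = x % |value|
        · subst hss
          apply pv_term_step_self value _ _ x hv
          simp
        · apply pv_term_step_other value _ _ x s hv hs0 hs1 hss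
          rw [PySem.Dict.getD_insert]
          rw [if_neg]
          intro hk
          apply hss
          have h1 := (pv_key_eq_iff value s x hv).mp hk
          rw [Int.emod_eq_of_lt hs0 hs1] at h1
          exact h1
      have hUeq : pvU value (fun t => (cnt.insert (PySem.Int.mod x value) (cnt.getD (PySem.Int.mod x value) 0 - 1)).getD t 0) (x + 1)
          = pvU value (fun t => cnt.getD t 0) x := by
        unfold pvU; rw [hglue]
      rw [ih _ (x + 1) (by omega) ?side1 ?side2, hUeq]
      case side1 =>
        intro t
        rw [PySem.Dict.getD_insert]
        split_ifs with h
        · subst h; omega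
        · exact hg t
      case side2 =>
        rw [hUeq]
        push_cast at hfuel ⊢
        omega
    · rw [if_neg hc]
      have hc0 : cnt.getD (PySem.Int.mod x value) 0 = 0 := le_antisymm (by omega) (hg _)
      have hself : pvTerm value (fun t => cnt.getD t 0) x (x % |value|) = x := by
        rw [pv_term_self value _ x hv]
        simp [hc0]
      have hmem : (x : Int) ∈ pvTerms value (fun t => cnt.getD t 0) x := by
        have h := List.mem_map_of_mem (f := pvTerm value (fun t => cnt.getD t 0) x)
          (PySem.List.mem_pyRange_one.mpr (pv_emod_self_lt value x hv))
        rw [hself] at h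
        exact h
      have hmin : ∀ y ∈ pvTerms value (fun t => cnt.getD t 0) x, x ≤ y := by
        intro y hy
        obtain ⟨s, hs, rfl⟩ := List.mem_map.mp hy
        exact pv_term_ge value _ x s hv (hg _)
      unfold pvU
      rw [pv_min?_eq _ x hmem hmin]
      rfl

theorem pv_U_le_term (value : Int) (g : Int → Int) (x s : Int) (hs0 : 0 ≤ s) (hs1 : s < |value|) : pvU value g x ≤ pvTerm value g x s := by
  have hmem : pvTerm value g x s ∈ pvTerms value g x :=
    List.mem_map_of_mem (PySem.List.mem_pyRange_one.mpr ⟨hs0, hs1⟩)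
  cases h : PySem.List.min? (pvTerms value g x) (fun t => t) with
  | none =>
    rw [PySem.List.min?_eq_none_iff] at h
    rw [h] at hmem; cases hmem
  | some m =>
    have := PySem.List.min?_isMin h _ hmem
    unfold pvU; rw [h]; simpa using this

-- the count A keeps per Python-% key equals the count B keeps per |value|-residue
theorem pv_count_eq (nums : List Int) (value s : Int) (hv : value ≠ 0)
    (hs0 : 0 ≤ s) (hs1 : s < |value|) :
    (nums.map (fun n => PySem.Int.mod n value)).count (PySem.Int.mod s value)
      = (nums.map (fun n => PySem.Int.mod n |value|)).count s := by
  have hv' : (0:Int) < |value| := abs_pos.mpr hv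
  rw [List.count_eq_countP, List.count_eq_countP, List.countP_map, List.countP_map]
  apply List.countP_congr
  intro n _
  simp only [Function.comp, beq_iff_eq]
  rw [PySem.Int.mod_eq_emod_of_pos hv']
  constructor
  · intro h
    have := (pv_key_eq_iff value n s hv).mp h
    rw [Int.emod_eq_of_lt hs0 hs1] at this
    exact this
  · intro h
    apply (pv_key_eq_iff value n s hv).mpr
    rw [Int.emod_eq_of_lt hs0 hs1]
    exact h

theorem pv_sum_count_le (l : List Int) (k : Nat) :
    (∑ s ∈ Finset.range k, l.count ((s : Nat) : Int)) ≤ l.length := by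
  induction l with
  | nil => simp
  | cons a l ih =>
    have hsum : ∀ s : Nat, (a :: l).count ((s : Nat) : Int)
        = l.count ((s : Nat) : Int) + if ((s : Nat) : Int) = a then 1 else 0 := by
      intro s
      by_cases h : ((s : Nat) : Int) = a
      · rw [List.count_cons, if_pos h, if_pos (by simp only [beq_iff_eq]; exact h.symm)]
      · rw [List.count_cons, if_neg h, if_neg (by simp only [beq_iff_eq]; exact fun hh => h hh.symm)]
    simp only [hsum, Finset.sum_add_distrib]
    have hone : (∑ s ∈ Finset.range k, if ((s : Nat) : Int) = a then 1 else 0) ≤ 1 := by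
      by_cases h0 : 0 ≤ a
      · have : ∀ s ∈ Finset.range k, (if ((s : Nat) : Int) = a then (1:Nat) else 0)
            = if s = a.toNat then 1 else 0 := by
          intro s _
          congr 1
          simp only [eq_iff_iff]
          omega
        rw [Finset.sum_congr rfl this, Finset.sum_ite_eq' (Finset.range k) a.toNat (fun _ => 1)]
        split <;> simp
      · have : ∀ s ∈ Finset.range k, (if ((s : Nat) : Int) = a then (1:Nat) else 0) = 0 := by
          intro s _
          rw [if_neg]; omega
        rw [Finset.sum_congr rfl this]
        simp
    simp only [List.length_cons]
    omega

theorem pv_exists_empty_class (nums : List Int) (v : Int) :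
    ∃ s : Int, 0 ≤ s ∧ s ≤ (nums.length : Int) ∧
      (nums.map (fun n => PySem.Int.mod n v)).count s = 0 := by
  by_contra hcon
  push_neg at hcon
  set l := nums.map (fun n => PySem.Int.mod n v) with hl
  have hge : ∀ s ∈ Finset.range (nums.length + 1), 1 ≤ l.count ((s : Nat) : Int) := by
    intro s hs
    have h1 : (0:Int) ≤ (s : Int) := by positivity
    have h2 : ((s : Nat) : Int) ≤ (nums.length : Int) := by
      simp only [Finset.mem_range] at hs
      omega
    have := hcon _ h1 h2
    omega
  have hcard := Finset.card_nsmul_le_sum (Finset.range (nums.length + 1)) (fun s => l.count ((s : Nat) : Int)) 1 hge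
  have hle := pv_sum_count_le l (nums.length + 1)
  simp only [Finset.card_range, smul_eq_mul, mul_one] at hcard
  have hlen : l.length = nums.length := by rw [hl, List.length_map]
  omega


def pvGA (nums : List Int) (value : Int) : Int → Int :=
  fun t => ((nums.map (fun n => PySem.Int.mod n value)).count t : Int)

theorem pv_A_eq_U (nums : List Int) (value : Int) (hv : value ≠ 0) :
    findSmallestInteger nums value = pvU value (pvGA nums value) 0 := by
  have hv' : (0:Int) < |value| := abs_pos.mpr hv
  have hgf : ∀ t, (PySem.Dict.counter (nums.map (fun n => PySem.Int.mod n value))).getD t 0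
      = ((nums.map (fun n => PySem.Int.mod n value)).count t : Int) :=
    fun t => PySem.Dict.getD_counter _ t
  have hfun : (fun t => (PySem.Dict.counter (nums.map (fun n => PySem.Int.mod n value))).getD t 0)
      = pvGA nums value := funext (fun t => by rw [hgf]; rfl)
  have hnon : ∀ t, 0 ≤ (PySem.Dict.counter (nums.map (fun n => PySem.Int.mod n value))).getD t 0 := by
    intro t; rw [hgf]; positivity
  have hfuel : pvU value (fun t => (PySem.Dict.counter (nums.map (fun n => PySem.Int.mod n value))).getD t 0) 0
      < 0 + ((nums.length * value.natAbs + 1 : Nat) : Int) := by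
    rw [hfun]
    have h1 := pv_U_le_term value (pvGA nums value) 0 0 le_rfl hv'
    have h2 : pvTerm value (pvGA nums value) 0 0
        = ((nums.map (fun n => PySem.Int.mod n value)).count (PySem.Int.mod 0 value) : Int) * |value| := by
      unfold pvTerm pvGA; norm_num
    have h3 : (((nums.map (fun n => PySem.Int.mod n value)).count (PySem.Int.mod 0 value)) : Int) ≤ (nums.length : Int) := by
      have hc := List.count_le_length (l := nums.map (fun n => PySem.Int.mod n value)) (a := PySem.Int.mod 0 value)
      have hlen : (nums.map (fun n => PySem.Int.mod n value)).length = nums.length := by simp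
      exact_mod_cast hlen ▸ hc
    have h4 : (((nums.map (fun n => PySem.Int.mod n value)).count (PySem.Int.mod 0 value)) : Int) * |value|
        ≤ (nums.length : Int) * |value| := mul_le_mul_of_nonneg_right h3 (le_of_lt hv')
    push_cast
    omega
  have := pv_loop_eq value hv (nums.length * value.natAbs + 1)
    (PySem.Dict.counter (nums.map (fun n => PySem.Int.mod n value))) 0 le_rfl hnon hfuel
  simp only [findSmallestInteger]
  rw [this, hfun]

theorem pv_B_eq_U (nums : List Int) (value : Int) (hv : value ≠ 0) :
    findSmallestInteger_alt nums value = pvU value (pvGA nums value) 0 := by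
  have hv' : (0:Int) < |value| := abs_pos.mpr hv
  have hpt : ∀ s, 0 ≤ s → s < |value| →
      s + (PySem.Dict.counter (nums.map (fun n => PySem.Int.mod n |value|))).getD s 0 * |value|
        = pvTerm value (pvGA nums value) 0 s := by
    intro s h0 h1
    unfold pvTerm pvGA
    rw [PySem.Dict.getD_counter, ← pv_count_eq nums value s hv h0 h1]
    have hz : (s - 0) % |value| = s := by rw [sub_zero, Int.emod_eq_of_lt h0 h1]
    rw [hz]
    omega
  simp only [findSmallestInteger_alt, PySem.List.len_eq]
  by_cases hcase : |value| ≤ (nums.length : Int) + 1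
  · rw [min_eq_left hcase]
    have hlists : (PySem.List.pyRange 0 |value| 1).map
          (fun r => r + (PySem.Dict.counter (nums.map (fun n => PySem.Int.mod n |value|))).getD r 0 * |value|)
        = pvTerms value (pvGA nums value) 0 := by
      unfold pvTerms
      apply List.map_congr_left
      intro s hs
      obtain ⟨h0, h1⟩ := PySem.List.mem_pyRange_one.mp hs
      exact hpt s h0 h1
    rw [hlists]; rfl
  · push_neg at hcase
    rw [min_eq_right (le_of_lt hcase)]
    have hsplit : PySem.List.pyRange 0 |value| 1
        = PySem.List.pyRange 0 ((nums.length : Int) + 1) 1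
            ++ PySem.List.pyRange ((nums.length : Int) + 1) |value| 1 :=
      PySem.List.pyRange_one_append (a := 0) (m := (nums.length : Int) + 1) (b := |value|)
        (by omega) (le_of_lt hcase)
    have hheadeq : (PySem.List.pyRange 0 ((nums.length : Int) + 1) 1).map
          (fun r => r + (PySem.Dict.counter (nums.map (fun n => PySem.Int.mod n |value|))).getD r 0 * |value|)
        = (PySem.List.pyRange 0 ((nums.length : Int) + 1) 1).map (pvTerm value (pvGA nums value) 0) := by
      apply List.map_congr_left
      intro s hs
      obtain ⟨h0, h1⟩ := PySem.List.mem_pyRange_one.mp hs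
      exact hpt s h0 (by omega)
    obtain ⟨s0, hs00, hs01, hs0c⟩ := pv_exists_empty_class nums |value|
    have hs0lt : s0 < |value| := by omega
    have hfAs0 : pvTerm value (pvGA nums value) 0 s0 = s0 := by
      rw [← hpt s0 hs00 hs0lt, PySem.Dict.getD_counter, hs0c]
      norm_num
    have hs0mem : pvTerm value (pvGA nums value) 0 s0
        ∈ (PySem.List.pyRange 0 ((nums.length : Int) + 1) 1).map (pvTerm value (pvGA nums value) 0) :=
      List.mem_map_of_mem (PySem.List.mem_pyRange_one.mpr ⟨hs00, by omega⟩)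
    cases hB : PySem.List.min?
        ((PySem.List.pyRange 0 ((nums.length : Int) + 1) 1).map (pvTerm value (pvGA nums value) 0))
        (fun t => t) with
    | none =>
      rw [PySem.List.min?_eq_none_iff] at hB
      rw [hB] at hs0mem; cases hs0mem
    | some mB =>
      have hmBle : mB ≤ s0 := by
        have := PySem.List.min?_isMin hB _ hs0mem
        simpa [hfAs0] using this
      have hmin : ∀ y ∈ pvTerms value (pvGA nums value) 0, mB ≤ y := by
        unfold pvTerms
        rw [hsplit, List.map_append]
        intro y hy
        rcases List.mem_append.mp hy with hy1 | hy2
        · exact PySem.List.min?_isMin hB _ hy1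
        · obtain ⟨s, hs, rfl⟩ := List.mem_map.mp hy2
          obtain ⟨h0, h1⟩ := PySem.List.mem_pyRange_one.mp hs
          have hsn : (0:Int) ≤ s := by omega
          have hterm : s ≤ pvTerm value (pvGA nums value) 0 s := by
            unfold pvTerm pvGA
            have hz : (s - 0) % |value| = s := by rw [sub_zero, Int.emod_eq_of_lt hsn h1]
            have hc : (0:Int) ≤ ((nums.map (fun n => PySem.Int.mod n value)).count (PySem.Int.mod s value) : Int) := by positivity
            have hm := mul_nonneg hc (le_of_lt hv')
            omega
          omega
      have hmem : mB ∈ pvTerms value (pvGA nums value) 0 := by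
        unfold pvTerms
        rw [hsplit, List.map_append]
        exact List.mem_append_left _ (PySem.List.min?_mem hB)
      unfold pvU
      rw [pv_min?_eq _ mB hmem hmin, hheadeq, hB]

-- ===== VERDICT (by name: the statement is the Claim_ definition above) =====
theorem findSmallestInteger_spec : Claim_equal_findSmallestInteger := by
  intro nums value _ hpre
  unfold Spec_findSmallestInteger
  rw [pv_A_eq_U nums value hpre, pv_B_eq_U nums value hpre]
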